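-- pv_equiv track=rewrite | github.com/pypi-data/pypi-mirror-397 | packages/sherpa-mc/sherpa_mc-3.0.3b0.tar.gz/sherpa_mc-3.0.3b0/MODEL/UFO/src/ufo_interface/lorentz_simplify.py | _get_einsum_string
-- ===== SOURCE A (Python) =====
-- def _get_letter_generator_for_einsum():
--     for i in range(97, 123):
--         yield chr(i)
--     for i in range(65, 91):
--         yield chr(i)
--     raise ValueError('Ran out of letters')
--
-- def _get_einsum_string(ranks, contraction_indices):
--     letters = _get_letter_generator_for_einsum()
--     contraction_string = ''
--     counter = 0
--     d = {j: min(i) for i in contraction_indices for j in i}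
--     indices = []
--     for rank in ranks:
--         lindices = []
--         for i in range(rank):
--             if counter in d:
--                 lindices.append(d[counter])
--             else:
--                 lindices.append(counter)
--             counter += 1
--         indices.append(lindices)
--     mapping = {}
--     letters_free = []
--     for i in indices:
--         for j in i:
--             if j not in mapping:
--                 letter = next(letters)
--                 mapping[j] = letter
--             else:
--                 letter = mapping[j]
--             contraction_string += letter
--             if j not in d:
--                 letters_free.append(letter)
--         contraction_string += ","
--     contraction_string = contraction_string[:-1]
--     return contraction_string, letters_free
-- ===== SOURCE B (Python) =====
-- def _get_einsum_string(ranks, contraction_indices):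
--     # declarative staged pipeline: build the flat canonical-index sequence, assign
--     # letters by rank in its first-occurrence dedup (no generator, no incremental
--     # mapping), then assemble the result by slicing the flat letter list at the
--     # cumulative rank boundaries
--     alphabet = 'abcdefghijklmnopqrstuvwxyzABCDEFGHIJKLMNOPQRSTUVWXYZ'
--     d = {j: min(g) for g in contraction_indices for j in g}
--     lens = [max(r, 0) for r in ranks]
--     total = sum(lens)
--     seq = [d.get(c, c) for c in range(total)]
--     order = list(dict.fromkeys(seq))
--     letter_of = {j: alphabet[k] for k, j in enumerate(order)}
--     flat = [letter_of[j] for j in seq]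
--     letters_free = [x for c, x in zip(range(total), flat) if c not in d]
--     parts = []
--     start = 0
--     for n in lens:
--         parts.append(''.join(flat[start:start + n]))
--         start += n
--     return ",".join(parts), letters_free
-- ===== Notes on version B (the rewrite author's own statement) =====
-- stated objective: alternative
-- what changed: B replaces A's two imperative passes with stateful letter generation (nested indices list, a generator and an incrementally-grown mapping dict, trailing-comma strip) by a declarative pipeline: it materialises the flat canonical-index sequence, derives each letter from the index's rank in the sequence's first-occurrence dedup, and assembles the string by slicing the flat letter list at cumulative rank boundaries joined with ','.
import Mathlib
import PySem

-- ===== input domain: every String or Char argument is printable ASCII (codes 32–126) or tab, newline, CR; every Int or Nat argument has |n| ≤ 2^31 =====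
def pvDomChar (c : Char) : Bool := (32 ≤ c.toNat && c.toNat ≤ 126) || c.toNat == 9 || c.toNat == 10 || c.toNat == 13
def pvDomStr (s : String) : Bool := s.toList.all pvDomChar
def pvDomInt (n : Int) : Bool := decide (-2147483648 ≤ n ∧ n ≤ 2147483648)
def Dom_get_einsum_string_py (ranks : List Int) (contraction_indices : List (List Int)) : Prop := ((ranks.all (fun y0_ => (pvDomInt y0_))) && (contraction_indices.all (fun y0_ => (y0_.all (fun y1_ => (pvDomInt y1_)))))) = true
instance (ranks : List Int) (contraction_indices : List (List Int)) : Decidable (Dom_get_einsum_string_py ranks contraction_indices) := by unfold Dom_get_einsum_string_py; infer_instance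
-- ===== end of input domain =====

-- B replaces A's stateful two-phase construction (nested indices list, letter
-- generator, incrementally grown mapping dict, trailing-comma strip) by a
-- declarative pipeline: flat canonical-index sequence, letters by rank in its
-- first-occurrence dedup, output assembled by slicing at rank boundaries;
-- objective: alternative decomposition, same asymptotic cost.

-- ===== PORT A =====
-- the 52 letters A's generator yields in order ('a'..'z' then 'A'..'Z'); position 52
-- is where the Python generator raises ValueError (excluded by Pre_), modelled by the
-- fallback '?' of pvLetter.
def pvAlpha : List Char := "abcdefghijklmnopqrstuvwxyzABCDEFGHIJKLMNOPQRSTUVWXYZ".toList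
def pvLetter (n : Nat) : Char := (PySem.List.pyGet? pvAlpha (n : Int)).getD '?'

-- d = {j: min(i) for i in contraction_indices for j in i}; min(i) is evaluated once per
-- inserted key j, so an empty group inserts nothing and its min is never taken: the
-- .getD 0 fallback is unreachable.
def pvMkD (contraction_indices : List (List Int)) : PySem.Dict Int Int :=
  contraction_indices.foldl
    (fun d i => i.foldl (fun d j => d.insert j ((PySem.List.min? i (fun x => x)).getD 0)) d)
    PySem.Dict.empty

-- 'd[counter] if counter in d else counter' (membership test = get? is some)
def pvResolve (d : PySem.Dict Int Int) (c : Int) : Int :=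
  match d.get? c with
  | some v => v
  | none => c

-- inner 'for i in range(rank)': builds lindices and advances counter
def pvGroupA (d : PySem.Dict Int Int) (cnt : Int) (rank : Int) : Int × List Int :=
  (PySem.List.pyRange 0 rank 1).foldl
    (fun p _ => (p.1 + 1, p.2 ++ [pvResolve d p.1])) (cnt, ([] : List Int))

-- first phase: 'for rank in ranks' building indices
def pvIndicesA (d : PySem.Dict Int Int) (ranks : List Int) (cnt : Int) : Int × List (List Int) :=
  ranks.foldl (fun st r => ((pvGroupA d st.1 r).1, st.2 ++ [(pvGroupA d st.1 r).2])) (cnt, ([] : List (List Int)))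

-- second-phase state: (contraction_string as chars, mapping, generator position, letters_free)
abbrev pvStA : Type := List Char × PySem.Dict Int Char × Nat × List String

-- second-phase body for one j
def pvStepA (d : PySem.Dict Int Int) (st : pvStA) (j : Int) : pvStA :=
  match st.2.1.get? j with
  | some letter =>
      (st.1 ++ [letter], st.2.1, st.2.2.1,
        if d.contains j then st.2.2.2 else st.2.2.2 ++ [String.ofList [letter]])
  | none =>
      (st.1 ++ [pvLetter st.2.2.1], st.2.1.insert j (pvLetter st.2.2.1), st.2.2.1 + 1,
        if d.contains j then st.2.2.2 else st.2.2.2 ++ [String.ofList [pvLetter st.2.2.1]])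

-- second-phase body for one group: inner loop then 'contraction_string += ","'
def pvGroupStepA (d : PySem.Dict Int Int) (st : pvStA) (g : List Int) : pvStA :=
  ((g.foldl (pvStepA d) st).1 ++ [','], (g.foldl (pvStepA d) st).2)

def get_einsum_string_py (ranks : List Int) (contraction_indices : List (List Int)) : String × List String :=
  let d := pvMkD contraction_indices
  let inds := (pvIndicesA d ranks 0).2
  let st := inds.foldl (pvGroupStepA d) (([] : List Char), PySem.Dict.empty, 0, ([] : List String))
  (String.ofList (PySem.List.slice st.1 none (some (-1))), st.2.2.2)   -- contraction_string[:-1]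

-- ===== PORT B =====
-- Source B's dict comprehension for d is the same expression as A's, so it shares pvMkD;
-- everything after it is the declarative pipeline of Source B, line for line.
def get_einsum_string_py_alt (ranks : List Int) (contraction_indices : List (List Int)) : String × List String :=
  let d := pvMkD contraction_indices
  let lens := ranks.map (fun r => max r 0)
  let total := lens.sum
  let seq := (PySem.List.pyRange 0 total 1).map (fun c => d.getD c c)
  let order := PySem.List.dedup seq
  -- letter_of = {j: alphabet[k] for k, j in enumerate(order)}; alphabet[k] with k ≥ 52
  -- is an IndexError in Python (excluded by Pre_), modelled by the '?' fallback
  let letter_of : PySem.Dict Int Char :=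
    (PySem.List.enumerate order 0).foldl
      (fun m p => m.insert p.2 ((PySem.List.pyGet? pvAlpha p.1).getD '?')) PySem.Dict.empty
  -- flat = [letter_of[j] for j in seq]; every j of seq is a key, the KeyError fallback '?' is unreachable
  let flat := seq.map (fun j => (letter_of.get? j).getD '?')
  let letters_free :=
    (((PySem.List.pyRange 0 total 1).zip flat).filter (fun p => !(d.contains p.1))).map
      (fun p => String.ofList [p.2])
  let parts := (lens.foldl
      (fun st n => (st.1 ++ [PySem.List.slice flat (some st.2) (some (st.2 + n))], st.2 + n))
      (([] : List (List Char)), (0 : Int))).1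
  (String.ofList (PySem.Chars.join [','] parts), letters_free)

-- ===== PRECONDITION & SPEC =====
-- canonical index of counter value c: min of the LAST group containing c (dict overwrite), else c
def pvCanon (contraction_indices : List (List Int)) (c : Int) : Int :=
  match contraction_indices.reverse.find? (fun g => g.contains c) with
  | some g => (PySem.List.min? g (fun x => x)).getD c
  | none => c

def pvTotal (ranks : List Int) : Nat := (ranks.map Int.toNat).sum

-- the distinct contraction indices that actually occur as counter values
def pvKeysIn (ranks : List Int) (contraction_indices : List (List Int)) : List Int :=
  (PySem.List.dedup contraction_indices.flatten).filter
    (fun k => decide (0 ≤ k ∧ k < (pvTotal ranks : Int)))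

-- Pre_ excludes exactly the inputs where A raises: more than 52 distinct einsum
-- indices, which makes A's letter generator raise ValueError (and B's alphabet[k]
-- raise IndexError).  The count is taken in closed form: counters outside d each get
-- a fresh letter, counters inside d share one letter per distinct canonical
-- (min-of-last-group) index.
def Pre_get_einsum_string_py (ranks : List Int) (contraction_indices : List (List Int)) : Prop :=
  (pvTotal ranks : Int) - (pvKeysIn ranks contraction_indices).length
    + (PySem.List.dedup ((pvKeysIn ranks contraction_indices).map (pvCanon contraction_indices))).length ≤ 52

instance (ranks : List Int) (contraction_indices : List (List Int)) : Decidable (Pre_get_einsum_string_py ranks contraction_indices) := by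
  unfold Pre_get_einsum_string_py; infer_instance

def pvWitness_get_einsum_string_py : List Int × List (List Int) := ([2, 2], [[1, 2]])

def Spec_get_einsum_string_py (ranks : List Int) (contraction_indices : List (List Int)) (out : String × List String) : Prop := out = get_einsum_string_py_alt ranks contraction_indices
instance (ranks : List Int) (contraction_indices : List (List Int)) (out : String × List String) : Decidable (Spec_get_einsum_string_py ranks contraction_indices out) := by unfold Spec_get_einsum_string_py; infer_instance

-- ===== CLAIM (what is proved, stated in full; the proofs are below) =====
def Claim_equal_get_einsum_string_py : Prop := ∀ (ranks : List Int) (contraction_indices : List (List Int)), Dom_get_einsum_string_py ranks contraction_indices → Pre_get_einsum_string_py ranks contraction_indices → Spec_get_einsum_string_py ranks contraction_indices (get_einsum_string_py ranks contraction_indices)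

-- ===== LEMMAS AND PROOFS =====

-- the letter both programs give to canonical index j of the flat sequence S:
-- position of j's first occurrence in S
def pvF (S : List Int) (j : Int) : Char := pvLetter ((PySem.List.dedup S).idxOf j)

-- A's phase-2 loop invariant relating (mapping, generator position) to the prefix P
-- of canonical indices processed so far
def pvInv (m : PySem.Dict Int Char) (n : Nat) (P : List Int) : Prop :=
  (∀ j : Int, m.get? j = if j ∈ PySem.List.dedup P then some (pvLetter ((PySem.List.dedup P).idxOf j)) else none)
  ∧ n = (PySem.List.dedup P).length

-- sum of the clamped ranks processed so far
def pvLens (ranks : List Int) : List Int := ranks.map (fun r => max r 0)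

-- the canonical-index segments of the counter stream, rank by rank
def pvSegs (d : PySem.Dict Int Int) (ranks : List Int) (cnt : Int) : List (List Int) :=
  match ranks with
  | [] => []
  | r :: rs => (PySem.List.pyRange cnt (cnt + max r 0) 1).map (fun c => d.getD c c) :: pvSegs d rs (cnt + max r 0)

-- ---- reused facts about A's helpers ----

theorem pvResolve_eq_getD (d : PySem.Dict Int Int) (c : Int) :
    pvResolve d c = d.getD c c := by
  cases h : d.get? c <;> simp [pvResolve, h, PySem.Dict.getD_eq_get?_getD]

-- every value of pvMkD is itself a key ("key-closed")
def pvClosed (d : PySem.Dict Int Int) : Prop :=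
  ∀ c v, d.get? c = some v → d.contains v = true

theorem contains_foldl_insert_of_contains (g : List Int) (m : Int) (d : PySem.Dict Int Int)
    (c : Int) (h : d.contains c = true) :
    (g.foldl (fun d j => d.insert j m) d).contains c = true := by
  induction g generalizing d with
  | nil => exact h
  | cons x g ih =>
      exact ih _ (by rw [PySem.Dict.contains_insert, h, Bool.or_true])

theorem contains_foldl_insert_of_mem (g : List Int) (m : Int) (d : PySem.Dict Int Int)
    (j : Int) (h : j ∈ g) :
    (g.foldl (fun d j => d.insert j m) d).contains j = true := by
  induction g generalizing d with
  | nil => cases h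
  | cons x g ih =>
      simp only [List.foldl_cons]
      rcases List.mem_cons.mp h with rfl | h
      · exact contains_foldl_insert_of_contains _ _ _ _
          (by rw [PySem.Dict.contains_insert]; simp)
      · exact ih _ h

theorem get?_foldl_insert (g : List Int) (m : Int) (d : PySem.Dict Int Int) (c v : Int)
    (h : (g.foldl (fun d j => d.insert j m) d).get? c = some v) :
    (g ≠ [] ∧ v = m) ∨ d.get? c = some v := by
  induction g generalizing d with
  | nil => exact Or.inr h
  | cons x g ih =>
      rcases ih _ h with ⟨_, rfl⟩ | h2
      · exact Or.inl ⟨by simp, rfl⟩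
      · rw [PySem.Dict.get?_insert] at h2
        by_cases hc : c = x
        · simp [hc] at h2; exact Or.inl ⟨by simp, h2.symm⟩
        · simp [hc] at h2; exact Or.inr h2

theorem pvClosed_group (g : List Int) (d : PySem.Dict Int Int) (h : pvClosed d) :
    pvClosed (g.foldl (fun d j => d.insert j ((PySem.List.min? g (fun x => x)).getD 0)) d) := by
  intro c v hv
  rcases get?_foldl_insert _ _ _ _ _ hv with ⟨hne, rfl⟩ | h2
  · cases hm : PySem.List.min? g (fun x => x) with
    | none => exact absurd ((PySem.List.min?_eq_none_iff g (fun x => x)).mp hm) hne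
    | some m0 =>
        simp only [hm, Option.getD_some] at hv ⊢
        exact contains_foldl_insert_of_mem _ _ _ _ (PySem.List.min?_mem hm)
  · exact contains_foldl_insert_of_contains _ _ _ _ (h _ _ h2)

theorem pvClosed_mkD (cis : List (List Int)) : pvClosed (pvMkD cis) := by
  unfold pvMkD
  have H : ∀ (l : List (List Int)) (d : PySem.Dict Int Int), pvClosed d →
      pvClosed (l.foldl (fun d i => i.foldl (fun d j => d.insert j ((PySem.List.min? i (fun x => x)).getD 0)) d) d) := by
    intro l
    induction l with
    | nil => intro d h; exact h
    | cons g l ih => intro d h; exact ih _ (pvClosed_group g d h)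
  exact H _ _ (by intro c v hv; simp [PySem.Dict.get?_empty] at hv)

theorem contains_resolve (d : PySem.Dict Int Int) (h : pvClosed d) (c : Int) :
    d.contains (pvResolve d c) = d.contains c := by
  cases hc : d.get? c with
  | none =>
      simp [pvResolve, hc]
  | some v =>
      have h1 : d.contains v = true := h _ _ hc
      have h2 : d.contains c = true := by
        by_contra hcc
        rw [Bool.not_eq_true] at hcc
        rw [(PySem.Dict.get?_eq_none_iff_contains d c).mpr hcc] at hc
        cases hc
      simp [pvResolve, hc, h1, h2]

-- phase-1 inner loop: counter and appended indices accumulate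
theorem groupA_acc (d : PySem.Dict Int Int) (L : List Int) :
    ∀ (cnt : Int) (acc : List Int),
      L.foldl (fun p (_ : Int) => (p.1 + 1, p.2 ++ [pvResolve d p.1])) (cnt, acc)
        = (cnt + L.length,
           acc ++ (L.foldl (fun p (_ : Int) => (p.1 + 1, p.2 ++ [pvResolve d p.1])) (cnt, ([] : List Int))).2) := by
  induction L with
  | nil => intro cnt acc; simp
  | cons x L ih =>
      intro cnt acc
      simp only [List.foldl_cons]
      rw [ih (cnt + 1) (acc ++ [pvResolve d cnt]), ih (cnt + 1) ([] ++ [pvResolve d cnt])]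
      refine Prod.ext ?_ ?_
      · simp only [List.length_cons]; push_cast; omega
      · simp

-- phase-1 outer loop accumulator
theorem indicesA_acc (d : PySem.Dict Int Int) (ranks : List Int) :
    ∀ (cnt : Int) (acc : List (List Int)),
      ranks.foldl (fun st r => ((pvGroupA d st.1 r).1, st.2 ++ [(pvGroupA d st.1 r).2])) (cnt, acc)
        = ((pvIndicesA d ranks cnt).1, acc ++ (pvIndicesA d ranks cnt).2) := by
  induction ranks with
  | nil => intro cnt acc; simp [pvIndicesA]
  | cons r ranks ih =>
      intro cnt acc
      simp only [pvIndicesA, List.foldl_cons]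
      rw [ih _ (acc ++ _), ih _ ([] ++ _)]
      simp

-- ",".join(parts) = the comma-terminated concatenation with the last char stripped
theorem join_comma (gs : List (List Char)) :
    (gs.flatMap (fun g => g ++ [','])).dropLast = PySem.Chars.join [','] gs := by
  induction gs with
  | nil => simp [PySem.Chars.join_nil]
  | cons g gs ih =>
      cases gs with
      | nil => simp [PySem.Chars.join_singleton]
      | cons g2 gs' =>
          rw [List.flatMap_cons]
          have hne : (g2 :: gs').flatMap (fun g => g ++ [',']) ≠ [] := by
            simp [List.flatMap_cons]
          rw [List.dropLast_append_of_ne_nil hne]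
          rw [ih, PySem.Chars.join_cons_cons]

-- ---- dedup / idxOf facts ----

theorem dedup_append_singleton (P : List Int) (j : Int) :
    PySem.List.dedup (P ++ [j])
      = if j ∈ PySem.List.dedup P then PySem.List.dedup P else PySem.List.dedup P ++ [j] := by
  simp only [PySem.List.dedup, PySem.Set.ofList, List.foldl_append, List.foldl_cons, List.foldl_nil]
  show PySem.Set.add _ j = _
  by_cases hj : j ∈ List.foldl PySem.Set.add PySem.Set.empty P <;>
    simp [PySem.Set.add]

theorem foldl_add_prefix (Q : List Int) :
    ∀ (s : List Int), s <+: Q.foldl PySem.Set.add s := by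
  induction Q with
  | nil => intro s; exact List.prefix_refl s
  | cons x Q ih =>
      intro s
      refine List.IsPrefix.trans ?_ (ih (PySem.Set.add s x))
      unfold PySem.Set.add
      split
      · exact List.prefix_refl s
      · exact List.prefix_append s [x]

theorem dedup_prefix (P Q : List Int) :
    PySem.List.dedup P <+: PySem.List.dedup (P ++ Q) := by
  simp only [PySem.List.dedup, PySem.Set.ofList, List.foldl_append]
  exact foldl_add_prefix Q _

theorem idxOf_of_prefix {l1 l2 : List Int} (h : l1 <+: l2) {j : Int} (hj : j ∈ l1) :
    l2.idxOf j = l1.idxOf j := by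
  obtain ⟨t, rfl⟩ := h
  rw [List.idxOf_append]
  simp [hj]

theorem idxOf_append_self (L : List Int) (j : Int) (hj : j ∉ L) :
    (L ++ [j]).idxOf j = L.length := by
  rw [List.idxOf_append]
  simp [hj]

-- ---- B's letter_of dict: lookup = position in the dedup ----

theorem letterOf_aux (L : List Int) (hL : L.Nodup) :
    ∀ (s : Nat) (m : PySem.Dict Int Char) (j : Int),
      ((PySem.List.enumerate L (s : Int)).foldl
          (fun m p => m.insert p.2 ((PySem.List.pyGet? pvAlpha p.1).getD '?')) m).get? j
        = if j ∈ L then some (pvLetter (s + L.idxOf j)) else m.get? j := by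
  induction L with
  | nil => intro s m j; simp [PySem.List.enumerate_nil]
  | cons x L ih =>
      intro s m j
      rw [PySem.List.enumerate_cons]
      simp only [List.foldl_cons]
      rw [show ((PySem.List.pyGet? pvAlpha ((s : Nat) : Int)).getD '?') = pvLetter s from rfl]
      have hs1 : (s : Int) + 1 = ((s + 1 : Nat) : Int) := by push_cast; omega
      rw [hs1, ih (List.nodup_cons.mp hL).2 (s + 1)]
      by_cases hjL : j ∈ L
      · have hjx : x ≠ j := fun h => (List.nodup_cons.mp hL).1 (h ▸ hjL)
        rw [if_pos hjL, if_pos (List.mem_cons_of_mem x hjL)]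
        have hcons : List.idxOf j (x :: L) = List.idxOf j L + 1 := by
          rw [List.idxOf_cons]
          have hb : (x == j) = false := beq_eq_false_iff_ne.mpr hjx
          rw [hb, Bool.cond_false]
        rw [hcons, show s + (List.idxOf j L + 1) = s + 1 + List.idxOf j L from by omega]
      · rw [if_neg hjL]
        by_cases hjx : j = x
        · subst hjx
          rw [PySem.Dict.get?_insert_self, if_pos (List.mem_cons_self),
            List.idxOf_cons_self, Nat.add_zero]
        · rw [PySem.Dict.get?_insert, if_neg hjx,
            if_neg (by simp [hjx, hjL])]

theorem letterOf_get (S : List Int) (j : Int) (hj : j ∈ S) :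
    ((PySem.List.enumerate (PySem.List.dedup S) 0).foldl
        (fun m p => m.insert p.2 ((PySem.List.pyGet? pvAlpha p.1).getD '?')) PySem.Dict.empty).get? j
      = some (pvF S j) := by
  have h0 : (0 : Int) = ((0 : Nat) : Int) := rfl
  rw [h0, letterOf_aux (PySem.List.dedup S) (PySem.List.nodup_dedup S) 0]
  simp [hj, pvF]

-- ---- A's phase-2 fold in closed form ----

theorem foldA_closed (d : PySem.Dict Int Int) (S : List Int) (G : List Int) :
    ∀ (P R : List Int) (cs : List Char) (m : PySem.Dict Int Char) (n : Nat) (free : List String),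
      S = P ++ G ++ R → pvInv m n P →
      (G.foldl (pvStepA d) (cs, m, n, free)).1 = cs ++ G.map (pvF S)
      ∧ (G.foldl (pvStepA d) (cs, m, n, free)).2.2.2
          = free ++ (G.filter (fun j => !(d.contains j))).map (fun j => String.ofList [pvF S j])
      ∧ pvInv (G.foldl (pvStepA d) (cs, m, n, free)).2.1
          (G.foldl (pvStepA d) (cs, m, n, free)).2.2.1 (P ++ G) := by
  induction G with
  | nil =>
      intro P R cs m n free hS hInv
      simp only [List.foldl_nil, List.map_nil, List.filter_nil, List.append_nil]
      exact ⟨trivial, trivial, hInv⟩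
  | cons j G ih =>
      intro P R cs m n free hS hInv
      have hpre : PySem.List.dedup (P ++ [j]) <+: PySem.List.dedup S := by
        have h1 : S = (P ++ [j]) ++ (G ++ R) := by simp [hS]
        rw [h1]; exact dedup_prefix _ _
      by_cases hjP : j ∈ PySem.List.dedup P
      · -- already-seen index: mapping hit
        have hded : PySem.List.dedup (P ++ [j]) = PySem.List.dedup P := by
          rw [dedup_append_singleton, if_pos hjP]
        have hletter : pvLetter ((PySem.List.dedup P).idxOf j) = pvF S j := by
          unfold pvF
          have h1 : (PySem.List.dedup S).idxOf j = (PySem.List.dedup (P ++ [j])).idxOf j :=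
            idxOf_of_prefix hpre (by rw [hded]; exact hjP)
          rw [h1, hded]
        have hget := hInv.1 j
        rw [if_pos hjP] at hget
        simp only [List.foldl_cons, pvStepA, hget]
        have hInv' : pvInv m n (P ++ [j]) := by
          refine ⟨fun j' => ?_, ?_⟩
          · rw [hded]; exact hInv.1 j'
          · rw [hded]; exact hInv.2
        have hrec := ih (P ++ [j]) R (cs ++ [pvLetter ((PySem.List.dedup P).idxOf j)])
          m n (if d.contains j = true then free else free ++ [String.ofList [pvLetter ((PySem.List.dedup P).idxOf j)]])
          (by simp [hS]) hInv'
        refine ⟨?_, ?_, by simpa [List.append_assoc] using hrec.2.2⟩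
        · rw [hrec.1, hletter]; simp
        · rw [hrec.2.1, hletter, List.filter_cons]
          by_cases hc : d.contains j = true <;> simp [hc]
      · -- fresh index: new letter pvLetter n
        have hget := hInv.1 j
        rw [if_neg hjP] at hget
        have hded : PySem.List.dedup (P ++ [j]) = PySem.List.dedup P ++ [j] := by
          rw [dedup_append_singleton, if_neg hjP]
        have hidx : (PySem.List.dedup (P ++ [j])).idxOf j = (PySem.List.dedup P).length := by
          rw [hded]; exact idxOf_append_self _ _ hjP
        have hletter : pvLetter n = pvF S j := by
          unfold pvF
          rw [idxOf_of_prefix hpre (by rw [hded]; exact List.mem_append_right _ (List.mem_singleton.mpr rfl)),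
            hidx, hInv.2]
        simp only [List.foldl_cons, pvStepA, hget]
        have hInv' : pvInv (m.insert j (pvLetter n)) (n + 1) (P ++ [j]) := by
          refine ⟨fun j' => ?_, ?_⟩
          · rw [PySem.Dict.get?_insert]
            by_cases hj' : j' = j
            · subst hj'
              rw [if_pos rfl,
                if_pos (by rw [hded]; exact List.mem_append_right _ (List.mem_singleton.mpr rfl)),
                hidx, hInv.2]
            · rw [if_neg hj', hInv.1 j']
              by_cases hj'P : j' ∈ PySem.List.dedup P
              · rw [if_pos hj'P, if_pos (by rw [hded]; exact List.mem_append_left _ hj'P)]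
                have h2 : (PySem.List.dedup (P ++ [j])).idxOf j' = (PySem.List.dedup P).idxOf j' := by
                  rw [hded, List.idxOf_append, if_pos hj'P]
                rw [h2]
              · rw [if_neg hj'P, if_neg (by
                  rw [hded]
                  simp only [List.mem_append, List.mem_singleton]
                  rintro (h | h)
                  · exact hj'P h
                  · exact hj' h)]
          · rw [hded, List.length_append, hInv.2]; simp
        have hrec := ih (P ++ [j]) R (cs ++ [pvLetter n])
          (m.insert j (pvLetter n)) (n + 1)
          (if d.contains j = true then free else free ++ [String.ofList [pvLetter n]])
          (by simp [hS]) hInv'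
        refine ⟨?_, ?_, by simpa [List.append_assoc] using hrec.2.2⟩
        · rw [hrec.1, hletter]; simp
        · rw [hrec.2.1, hletter, List.filter_cons]
          by_cases hc : d.contains j = true <;> simp [hc]

theorem foldGroups_closed (d : PySem.Dict Int Int) (S : List Int) (gs : List (List Int)) :
    ∀ (P : List Int) (cs : List Char) (m : PySem.Dict Int Char) (n : Nat) (free : List String),
      S = P ++ gs.flatten → pvInv m n P →
      (gs.foldl (pvGroupStepA d) (cs, m, n, free)).1
        = cs ++ gs.flatMap (fun g => g.map (pvF S) ++ [','])
      ∧ (gs.foldl (pvGroupStepA d) (cs, m, n, free)).2.2.2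
          = free ++ (gs.flatten.filter (fun j => !(d.contains j))).map
              (fun j => String.ofList [pvF S j]) := by
  induction gs with
  | nil => intro P cs m n free hS hInv; simp
  | cons g gs ih =>
      intro P cs m n free hS hInv
      have hS' : S = P ++ g ++ gs.flatten := by simpa [List.append_assoc] using hS
      have hA := foldA_closed d S g P gs.flatten cs m n free hS' hInv
      rcases hfold : g.foldl (pvStepA d) (cs, m, n, free) with ⟨c1, m1, n1, f1⟩
      rw [hfold] at hA
      dsimp only at hA
      simp only [List.foldl_cons, pvGroupStepA, hfold]
      have hrec := ih (P ++ g) (c1 ++ [',']) m1 n1 f1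
        (by simpa [List.append_assoc] using hS') hA.2.2
      obtain ⟨hrec1, hrec2⟩ := hrec
      refine ⟨?_, ?_⟩
      · rw [hrec1, hA.1]; simp
      · rw [hrec2, hA.2.1]; simp

-- ---- phase 1 = canonical segments ----

theorem groupA_spec (d : PySem.Dict Int Int) (L : List Int) :
    ∀ (cnt : Int),
      L.foldl (fun p (_ : Int) => (p.1 + 1, p.2 ++ [pvResolve d p.1])) (cnt, ([] : List Int))
        = (cnt + L.length,
           (PySem.List.pyRange cnt (cnt + L.length) 1).map (fun c => d.getD c c)) := by
  induction L with
  | nil => intro cnt; simp [PySem.List.pyRange_one_eq_nil (le_refl cnt)]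
  | cons x L ih =>
      intro cnt
      simp only [List.foldl_cons]
      rw [groupA_acc d L (cnt + 1) ([] ++ [pvResolve d cnt]), ih (cnt + 1)]
      have hcast : cnt + ((x :: L).length : Int) = cnt + 1 + (L.length : Int) := by
        simp only [List.length_cons]; push_cast; omega
      rw [hcast, PySem.List.pyRange_one_cons (show cnt < cnt + 1 + (L.length : Int) by
        have := Int.natCast_nonneg L.length; omega)]
      rw [List.map_cons, pvResolve_eq_getD]
      simp

theorem groupA_eq (d : PySem.Dict Int Int) (cnt r : Int) :
    pvGroupA d cnt r
      = (cnt + max r 0, (PySem.List.pyRange cnt (cnt + max r 0) 1).map (fun c => d.getD c c)) := by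
  unfold pvGroupA
  rw [groupA_spec]
  have : ((PySem.List.pyRange 0 r 1).length : Int) = max r 0 := by
    rw [PySem.List.length_pyRange_one]; omega
  rw [this]

theorem lens_sum_nonneg (ranks : List Int) : 0 ≤ (pvLens ranks).sum := by
  refine List.sum_nonneg ?_
  intro x hx
  simp only [pvLens, List.mem_map] at hx
  obtain ⟨r, _, rfl⟩ := hx
  exact le_max_right r 0

theorem indicesA_spec (d : PySem.Dict Int Int) (ranks : List Int) :
    ∀ (cnt : Int), pvIndicesA d ranks cnt = (cnt + (pvLens ranks).sum, pvSegs d ranks cnt) := by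
  induction ranks with
  | nil => intro cnt; simp [pvIndicesA, pvSegs, pvLens]
  | cons r rs ih =>
      intro cnt
      unfold pvIndicesA
      simp only [List.foldl_cons]
      rw [show (([] : List (List Int)) ++ [(pvGroupA d cnt r).2]) = [(pvGroupA d cnt r).2] by simp] at *
      rw [indicesA_acc d rs (pvGroupA d cnt r).1 [(pvGroupA d cnt r).2], ih (pvGroupA d cnt r).1]
      rw [groupA_eq]
      refine Prod.ext ?_ ?_
      · simp only [pvLens, List.map_cons, List.sum_cons]; ring_nf
      · show _ ++ _ = pvSegs d (r :: rs) cnt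
        simp [pvSegs]

theorem flatten_segs (d : PySem.Dict Int Int) (ranks : List Int) :
    ∀ (cnt : Int),
      (pvSegs d ranks cnt).flatten
        = (PySem.List.pyRange cnt (cnt + (pvLens ranks).sum) 1).map (fun c => d.getD c c) := by
  induction ranks with
  | nil => intro cnt; simp [pvSegs, pvLens, PySem.List.pyRange_one_eq_nil (le_refl cnt)]
  | cons r rs ih =>
      intro cnt
      simp only [pvSegs, List.flatten_cons, ih (cnt + max r 0)]
      have h1 : cnt ≤ cnt + max r 0 := by omega
      have h2 : cnt + max r 0 ≤ cnt + (pvLens (r :: rs)).sum := by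
        have := lens_sum_nonneg rs
        simp only [pvLens, List.map_cons, List.sum_cons]
        simp only [pvLens] at this
        omega
      rw [PySem.List.pyRange_one_append cnt (cnt + max r 0) (cnt + (pvLens (r :: rs)).sum) h1 h2,
        List.map_append]
      congr 2
      simp only [pvLens, List.map_cons, List.sum_cons]
      ring_nf

-- ---- B's slicing at rank boundaries ----

theorem slice_map_pyRange (g : Int → Char) (total a b : Int)
    (h0 : 0 ≤ a) (hab : a ≤ b) (hb : b ≤ total) :
    PySem.List.slice ((PySem.List.pyRange 0 total 1).map g) (some a) (some b)
      = (PySem.List.pyRange a b 1).map g := by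
  obtain ⟨A, rfl⟩ : ∃ A : Nat, a = (A : Int) := ⟨a.toNat, by omega⟩
  obtain ⟨N, rfl⟩ : ∃ N : Nat, b = (A : Int) + (N : Int) := ⟨(b - (A : Int)).toNat, by omega⟩
  rw [PySem.List.slice_natCast_add]
  rw [PySem.List.pyRange_one_append 0 (A : Int) total h0 (le_trans hab hb), List.map_append]
  have hlen1 : ((PySem.List.pyRange 0 (A : Int) 1).map g).length = A := by
    rw [List.length_map, PySem.List.length_pyRange_one]; omega
  rw [List.drop_left' hlen1]
  rw [PySem.List.pyRange_one_append (A : Int) ((A : Int) + (N : Int)) total hab hb, List.map_append]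
  have hlen2 : ((PySem.List.pyRange (A : Int) ((A : Int) + (N : Int)) 1).map g).length = N := by
    rw [List.length_map, PySem.List.length_pyRange_one]; omega
  rw [List.take_left' hlen2]

theorem partsB_spec (d : PySem.Dict Int Int) (total : Int) (flat : List Char)
    (S : List Int)
    (hflat : flat = (PySem.List.pyRange 0 total 1).map (fun c => pvF S (d.getD c c)))
    (ranks : List Int) :
    ∀ (start : Int) (acc : List (List Char)),
      0 ≤ start → start + (pvLens ranks).sum ≤ total →
      ((pvLens ranks).foldl
          (fun st n => (st.1 ++ [PySem.List.slice flat (some st.2) (some (st.2 + n))], st.2 + n))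
          (acc, start)).1
        = acc ++ (pvSegs d ranks start).map (fun g => g.map (pvF S)) := by
  induction ranks with
  | nil => intro start acc _ _; simp [pvLens, pvSegs]
  | cons r rs ih =>
      intro start acc h0 hsum
      have hm : (0 : Int) ≤ max r 0 := le_max_right r 0
      have hrest := lens_sum_nonneg rs
      have hsums : (pvLens (r :: rs)).sum = max r 0 + (pvLens rs).sum := by
        simp [pvLens]
      rw [hsums] at hsum
      simp only [pvLens, List.map_cons, List.foldl_cons]
      have hslice : PySem.List.slice flat (some start) (some (start + max r 0))
          = ((PySem.List.pyRange start (start + max r 0) 1).map (fun c => d.getD c c)).map (pvF S) := by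
        rw [hflat, slice_map_pyRange _ total start (start + max r 0) h0 (by omega) (by omega),
          List.map_map]
        rfl
      have := ih (start + max r 0) (acc ++ [PySem.List.slice flat (some start) (some (start + max r 0))])
        (by omega) (by omega)
      simp only [pvLens] at this
      rw [this, hslice]
      simp [pvSegs]

-- ---- letters_free shapes ----

theorem zip_map_filter (L : List Int) (g : Int → Char) (p : Int → Bool) :
    (((L.zip (L.map g)).filter (fun q => p q.1)).map (fun q => String.ofList [q.2]))
      = (L.filter p).map (fun c => String.ofList [g c]) := by
  induction L with
  | nil => simp
  | cons c L ih =>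
      simp only [List.map_cons, List.zip_cons_cons, List.filter_cons]
      by_cases hc : p c = true <;> simp [hc, ih]

-- A = B, as return values
theorem main_eq (ranks : List Int) (cis : List (List Int)) :
    get_einsum_string_py ranks cis = get_einsum_string_py_alt ranks cis := by
  have hclosed := pvClosed_mkD cis
  simp only [get_einsum_string_py, get_einsum_string_py_alt]
  set d := pvMkD cis with hd
  set T := (ranks.map (fun r => max r 0)).sum with hT
  set S := (PySem.List.pyRange 0 T 1).map (fun c => d.getD c c) with hS
  have hlens : pvLens ranks = ranks.map (fun r => max r 0) := rfl
  -- phase 1 produces the canonical segments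
  have h1 : (pvIndicesA d ranks 0).2 = pvSegs d ranks 0 := by
    rw [indicesA_spec]
  have hflatten : (pvSegs d ranks 0).flatten = S := by
    rw [flatten_segs, hlens, ← hT, zero_add, hS]
  -- A's phase 2 in closed form
  have hInv0 : pvInv PySem.Dict.empty 0 ([] : List Int) := by
    refine ⟨fun j => ?_, rfl⟩
    rw [PySem.Dict.get?_empty]
    rfl
  have hG := foldGroups_closed d S (pvSegs d ranks 0) [] [] PySem.Dict.empty 0 []
    (by rw [hflatten]; rfl) hInv0
  rw [h1, hG.1, hG.2]
  -- B's flat letter list in closed form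
  have hflat0 : S.map (fun j =>
      (((PySem.List.enumerate (PySem.List.dedup S) 0).foldl
          (fun m p => m.insert p.2 ((PySem.List.pyGet? pvAlpha p.1).getD '?'))
          PySem.Dict.empty).get? j).getD '?')
      = (PySem.List.pyRange 0 T 1).map (fun c => pvF S (d.getD c c)) := by
    have hstep : S.map (fun j =>
        (((PySem.List.enumerate (PySem.List.dedup S) 0).foldl
            (fun m p => m.insert p.2 ((PySem.List.pyGet? pvAlpha p.1).getD '?'))
            PySem.Dict.empty).get? j).getD '?') = S.map (pvF S) :=
      List.map_congr_left (fun j hj => by rw [letterOf_get S j hj]; rfl)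
    rw [hstep, hS, List.map_map]
    rfl
  rw [hflat0]
  refine congrArg₂ Prod.mk ?_ ?_
  · -- the contraction string
    rw [PySem.List.slice_to_neg_one]
    have hfm : (pvSegs d ranks 0).flatMap (fun g => g.map (pvF S) ++ [','])
        = ((pvSegs d ranks 0).map (fun g => g.map (pvF S))).flatMap (fun g => g ++ [',']) := by
      rw [List.flatMap_map]
    rw [List.nil_append, hfm, join_comma]
    have hparts := partsB_spec d T ((PySem.List.pyRange 0 T 1).map (fun c => pvF S (d.getD c c))) S
      rfl ranks 0 [] le_rfl (by rw [hlens, ← hT, zero_add])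
    rw [hlens] at hparts
    rw [hparts]
    rw [List.nil_append]
  · -- letters_free
    rw [List.nil_append, hflatten, hS]
    rw [zip_map_filter (PySem.List.pyRange 0 T 1) (fun c => pvF S (d.getD c c))
      (fun c => !(d.contains c))]
    rw [List.filter_map, List.map_map]
    refine congrArg _ ?_
    refine List.filter_congr ?_
    intro c _
    show (!(d.contains (d.getD c c))) = (!(d.contains c))
    rw [← pvResolve_eq_getD, contains_resolve d hclosed c]

-- ===== VERDICT (by name: the statement is the Claim_ definition above) =====
theorem get_einsum_string_py_spec : Claim_equal_get_einsum_string_py := by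
  intro ranks cis _ _
  unfold Spec_get_einsum_string_py
  exact main_eq ranks cis
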